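-- pv_equiv track=rewrite | github.com/blakelinkd/google_job_scraper | compatibility.py | get_compatibility_rating_and_skills
-- ===== SOURCE A (Python) =====
-- def get_compatibility_rating_and_skills(description, keywords):
--     skill_count = {}
--     description_lower = description.lower()
--     for keyword in keywords:
--         if keyword.lower() in description_lower:
--             skill_count[keyword] = keywords[keyword]
--     compatibility_rating = sum(skill_count.values())
--     sorted_skills = sorted(skill_count, key=lambda x: skill_count[x], reverse=True)
--     return compatibility_rating, ', '.join(sorted_skills)
-- ===== SOURCE B (Python) =====
-- def get_compatibility_rating_and_skills(description, keywords):
--     description_lower = description.lower()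
--     total = 0
--     buckets = {}
--     for keyword, score in keywords.items():
--         if keyword.lower() in description_lower:
--             total += score
--             buckets.setdefault(score, []).append(keyword)
--     names = []
--     for score in sorted(buckets, reverse=True):
--         names.extend(buckets[score])
--     return total, ', '.join(names)
-- ===== Notes on version B (the rewrite author's own statement) =====
-- stated objective: alternative
-- what changed: Instead of A's pipeline (build a dict of matched keyword->score, sum its values, then comparison-sort the matched keywords with a dict-lookup key), B makes one pass that accumulates the running total and groups matched keywords into score buckets, and emits the skill list by concatenating the buckets in descending order of the distinct scores, which reproduces the stable descending sort without ever sorting the keywords themselves.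
import Mathlib
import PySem

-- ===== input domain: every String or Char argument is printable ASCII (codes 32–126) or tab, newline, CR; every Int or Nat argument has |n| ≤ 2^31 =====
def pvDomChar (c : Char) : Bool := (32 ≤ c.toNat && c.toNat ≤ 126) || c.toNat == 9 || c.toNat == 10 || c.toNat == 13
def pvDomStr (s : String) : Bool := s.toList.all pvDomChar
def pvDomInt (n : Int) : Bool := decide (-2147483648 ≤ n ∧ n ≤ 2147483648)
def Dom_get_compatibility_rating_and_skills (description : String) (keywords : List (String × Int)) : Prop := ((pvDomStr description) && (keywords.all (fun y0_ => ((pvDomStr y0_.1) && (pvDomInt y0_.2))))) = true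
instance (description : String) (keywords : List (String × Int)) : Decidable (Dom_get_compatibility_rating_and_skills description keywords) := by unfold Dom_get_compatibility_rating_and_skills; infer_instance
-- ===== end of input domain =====

-- B replaces A's build-dict / sum-values / comparison-sort-the-keywords pipeline by one pass that
-- accumulates the total and score→keywords buckets, then concatenates the buckets in descending
-- order of the distinct scores (objective: alternative; same cost).


-- ===== PORT A =====
-- 'keywords' is a Python dict, represented as its item list; 'for keyword in keywords' walks its
-- keys and 'keywords[keyword]' looks the key up (the key is present, so the default 0 is never used).
def get_compatibility_rating_and_skills (description : String) (keywords : List (String × Int)) : Int × String :=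
  let kwd : PySem.Dict String Int := PySem.Dict.mk keywords
  let description_lower := PySem.Str.lower description
  let skill_count :=
    kwd.keys.foldl (fun d keyword =>
      if PySem.Str.isIn (PySem.Str.lower keyword) description_lower
      then d.insert keyword (kwd.getD keyword 0)
      else d) (PySem.Dict.mk [])
  let compatibility_rating := skill_count.values.sum
  let sorted_skills := PySem.List.sorted skill_count.keys (fun x => skill_count.getD x 0) true
  (compatibility_rating, PySem.Str.join ", " sorted_skills)

-- ===== PORT B =====
-- one pass: running total plus buckets score → matched keywords (setdefault(...).append = modify);
-- then the buckets are emitted in descending order of the distinct scores.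
def get_compatibility_rating_and_skills_alt (description : String) (keywords : List (String × Int)) : Int × String :=
  let description_lower := PySem.Str.lower description
  let st := keywords.foldl (fun (acc : Int × PySem.Dict Int (List String)) kv =>
      if PySem.Str.isIn (PySem.Str.lower kv.1) description_lower
      then (acc.1 + kv.2, acc.2.modify kv.2 [] (fun l => l ++ [kv.1]))
      else acc) (0, PySem.Dict.empty)
  let names := (PySem.List.sorted st.2.keys (fun s => s) true).flatMap (fun s => st.2.getD s [])
  (st.1, PySem.Str.join ", " names)

-- ===== PRECONDITION & SPEC =====
-- 'keywords' stands for a Python dict, whose keys are unique; association lists with duplicate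
-- keys represent no dict (their reading is ambiguous), so exactly those lists are excluded.
def Pre_get_compatibility_rating_and_skills (description : String) (keywords : List (String × Int)) : Prop :=
  (keywords.map Prod.fst).Nodup
instance (description : String) (keywords : List (String × Int)) : Decidable (Pre_get_compatibility_rating_and_skills description keywords) := by unfold Pre_get_compatibility_rating_and_skills; infer_instance

def pvWitness_get_compatibility_rating_and_skills : String × (List (String × Int)) :=
  ("senior Python and SQL developer", [("python", 3), ("sql", 2), ("rust", 9)])

def Spec_get_compatibility_rating_and_skills (description : String) (keywords : List (String × Int)) (out : Int × String) : Prop := out = get_compatibility_rating_and_skills_alt description keywords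
instance (description : String) (keywords : List (String × Int)) (out : Int × String) : Decidable (Spec_get_compatibility_rating_and_skills description keywords out) := by unfold Spec_get_compatibility_rating_and_skills; infer_instance

-- ===== CLAIM (what is proved, stated in full; the proofs are below) =====
def Claim_equal_get_compatibility_rating_and_skills : Prop := ∀ (description : String) (keywords : List (String × Int)), Dom_get_compatibility_rating_and_skills description keywords → Pre_get_compatibility_rating_and_skills description keywords → Spec_get_compatibility_rating_and_skills description keywords (get_compatibility_rating_and_skills description keywords)

-- ===== LEMMAS AND PROOFS =====

-- insertBy only compares the inserted element with members of the list
theorem pv_insertBy_congr {α : Type} (b₁ b₂ : α → α → Bool) (x : α) (ys : List α)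
    (h : ∀ y ∈ ys, b₁ x y = b₂ x y) :
    PySem.List.insertBy b₁ x ys = PySem.List.insertBy b₂ x ys := by
  induction ys with
  | nil => rfl
  | cons y ys ih =>
    simp only [PySem.List.insertBy]
    rw [h y (by simp)]
    split
    · rfl
    · rw [ih (fun z hz => h z (by simp [hz]))]

theorem pv_sorted_rev_congr_aux {α κ : Type} [LinearOrder κ] (k₁ k₂ : α → κ) :
    ∀ (xs acc : List α), (∀ x ∈ acc, k₁ x = k₂ x) → (∀ x ∈ xs, k₁ x = k₂ x) →
    xs.foldl (fun acc x => PySem.List.insertBy (fun a b => decide (k₁ b < k₁ a)) x acc) acc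
      = xs.foldl (fun acc x => PySem.List.insertBy (fun a b => decide (k₂ b < k₂ a)) x acc) acc := by
  intro xs
  induction xs with
  | nil => intro acc _ _; rfl
  | cons w xs ih =>
    intro acc hacc hxs
    simp only [List.foldl_cons]
    rw [pv_insertBy_congr _ (fun a b => decide (k₂ b < k₂ a)) w acc
        (fun y hy => by rw [hacc y hy, hxs w (by simp)])]
    refine ih _ (fun z hz => ?_) (fun z hz => hxs z (by simp [hz]))
    rcases (PySem.List.mem_insertBy _ _ _ _).1 hz with h | h
    · rw [h]; exact hxs w (by simp)
    · exact hacc z h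

-- a stable reverse sort only looks at the keys of list members
theorem pv_sorted_rev_congr {α κ : Type} [LinearOrder κ] (xs : List α) (k₁ k₂ : α → κ)
    (h : ∀ x ∈ xs, k₁ x = k₂ x) :
    PySem.List.sorted xs k₁ true = PySem.List.sorted xs k₂ true := by
  rw [PySem.List.sorted_rev_eq_foldl_insertBy, PySem.List.sorted_rev_eq_foldl_insertBy]
  exact pv_sorted_rev_congr_aux k₁ k₂ xs [] (by simp) h

theorem pv_insertBy_map {α β : Type} (bf : β → β → Bool) (f : α → β) (x : α) (ys : List α) :
    PySem.List.insertBy bf (f x) (ys.map f)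
      = (PySem.List.insertBy (fun a b => bf (f a) (f b)) x ys).map f := by
  induction ys with
  | nil => rfl
  | cons y ys ih =>
    simp only [List.map_cons, PySem.List.insertBy]
    split
    · simp
    · simp only [List.map_cons, ih]

-- sorting a mapped list = mapping the sorted list (with the key composed)
theorem pv_map_sorted_rev {α β κ : Type} [LinearOrder κ] (xs : List α) (f : α → β) (key : β → κ) :
    PySem.List.sorted (xs.map f) key true
      = (PySem.List.sorted xs (fun x => key (f x)) true).map f := by
  rw [PySem.List.sorted_rev_eq_foldl_insertBy, PySem.List.sorted_rev_eq_foldl_insertBy]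
  suffices h : ∀ (xs acc : List α),
      (xs.map f).foldl (fun acc x => PySem.List.insertBy (fun a b => decide (key b < key a)) x acc) (acc.map f)
        = (xs.foldl (fun acc x => PySem.List.insertBy (fun a b => decide (key (f b) < key (f a))) x acc) acc).map f by
    simpa using h xs []
  intro xs
  induction xs with
  | nil => intro acc; rfl
  | cons w xs ih =>
    intro acc
    simp only [List.map_cons, List.foldl_cons]
    rw [pv_insertBy_map _ f w acc, ih]

-- the conditional-insert loop over fresh, pairwise-distinct keys builds the filtered item list
theorem pv_build_items (c : String → Bool) (g : String → Int) :
    ∀ (l : List (String × Int)) (d : PySem.Dict String Int),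
      (∀ p ∈ l, d.contains p.1 = false) → (l.map Prod.fst).Nodup →
      (l.foldl (fun d p => if c p.1 then d.insert p.1 (g p.1) else d) d).items
        = d.items ++ (l.filter (fun p => c p.1)).map (fun p => (p.1, g p.1)) := by
  intro l
  induction l with
  | nil => intro d _ _; simp
  | cons p l ih =>
    intro d hd hn
    have hn' : (l.map Prod.fst).Nodup := (List.nodup_cons.1 (by simpa using hn)).2
    have hp1 : p.1 ∉ l.map Prod.fst := (List.nodup_cons.1 (by simpa using hn)).1
    simp only [List.foldl_cons, List.filter_cons]
    by_cases hc : c p.1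
    · rw [if_pos hc, if_pos hc, ih _ (fun q hq => ?_) hn',
        PySem.Dict.items_insert_of_not_contains d _ (hd p (by simp))]
      · simp
      · rw [PySem.Dict.contains_insert]
        simp only [Bool.or_eq_false_iff]
        refine ⟨?_, hd q (by simp [hq])⟩
        simp only [beq_eq_false_iff_ne, ne_eq]
        intro he
        exact hp1 (he ▸ List.mem_map_of_mem hq)
    · rw [if_neg hc, if_neg hc, ih _ (fun q hq => hd q (by simp [hq])) hn']

-- ----- bucket machinery for B -----

-- insertBy skips a prefix it does not insert into
theorem pv_insertBy_append_skip {α : Type} (before : α → α → Bool) (x : α) (u v : List α)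
    (h : ∀ y ∈ u, before x y = false) :
    PySem.List.insertBy before x (u ++ v) = u ++ PySem.List.insertBy before x v := by
  induction u with
  | nil => simp
  | cons y u ih =>
    simp only [List.cons_append, PySem.List.insertBy, h y (by simp)]
    simp only [Bool.false_eq_true, if_false, List.cons_inj_right]
    exact ih (fun z hz => h z (by simp [hz]))

-- insertBy puts x first when it goes before everything
theorem pv_insertBy_front {α : Type} (before : α → α → Bool) (x : α) (v : List α)
    (h : ∀ y ∈ v, before x y = true) :
    PySem.List.insertBy before x v = x :: v := by
  cases v with
  | nil => rfl
  | cons y v => simp [PySem.List.insertBy, h y (by simp)]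

-- insertBy produces a permutation of consing
theorem pv_insertBy_perm {α : Type} (before : α → α → Bool) (x : α) (ys : List α) :
    (PySem.List.insertBy before x ys).Perm (x :: ys) := by
  induction ys with
  | nil => exact List.Perm.refl _
  | cons y ys ih =>
    simp only [PySem.List.insertBy]
    split
    · exact List.Perm.refl _
    · exact (ih.cons y).trans (List.Perm.swap x y ys)

-- inserting a fresh element keeps a strictly decreasing Int list strictly decreasing
theorem pv_insertBy_pairwise_gt (x : Int) (S : List Int)
    (hS : S.Pairwise (· > ·)) (hx : x ∉ S) :
    (PySem.List.insertBy (fun a b => decide (b < a)) x S).Pairwise (· > ·) := by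
  induction S with
  | nil => simp [PySem.List.insertBy]
  | cons s S ih =>
    rcases List.pairwise_cons.1 hS with ⟨hs, hS'⟩
    simp only [PySem.List.insertBy]
    split
    · rename_i hlt
      refine List.pairwise_cons.2 ⟨?_, hS⟩
      intro y hy
      rcases List.mem_cons.1 hy with h | h
      · exact h ▸ decide_eq_true_iff.1 hlt
      · exact lt_trans (hs y h) (decide_eq_true_iff.1 hlt)
    · rename_i hnlt
      have hxs : x < s :=
        lt_of_le_of_ne (le_of_not_gt (fun hh => hnlt (decide_eq_true_iff.2 hh)))
          (fun he => hx (by rw [he]; simp))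
      refine List.pairwise_cons.2 ⟨?_, ih hS' (fun h => hx (List.mem_cons_of_mem _ h))⟩
      intro y hy
      rcases (PySem.List.mem_insertBy _ _ _ _).1 hy with h | h
      · exact h ▸ hxs
      · exact hs y h

-- the descending sort of a deduplicated Int list is strictly decreasing
theorem pv_sorted_set_pairwise_gt (l : List Int) :
    (PySem.List.sorted (PySem.Set.ofList l) (fun s => s) true).Pairwise (· > ·) := by
  have hnd : (PySem.List.sorted (PySem.Set.ofList l) (fun s => s) true).Nodup :=
    (PySem.List.sorted_perm (PySem.Set.ofList l) (fun s => s) true).nodup_iff.2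
      (PySem.Set.nodup_ofList l)
  have hpw := PySem.List.sorted_pairwise_rev (PySem.Set.ofList l) (fun s => s)
  exact (hpw.and hnd).imp (fun {a b} h => lt_of_le_of_ne h.1 h.2.symm)

-- inserting an element whose bucket is empty does not change the bucket concatenation
theorem pv_flatMap_insertBy_empty {α : Type} (before : Int → Int → Bool) (s : Int)
    (S : List Int) (B : Int → List α) (h : B s = []) :
    (PySem.List.insertBy before s S).flatMap B = S.flatMap B := by
  induction S with
  | nil => simp [PySem.List.insertBy, h]
  | cons u S ih =>
    simp only [PySem.List.insertBy]
    split
    · simp [h]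
    · simp only [List.flatMap_cons, ih]

-- inserting x (key x a score of S) into the bucket concatenation appends x to its bucket
theorem pv_insertBy_flatMap {α : Type} (key : α → Int) (x : α) :
    ∀ (S : List Int) (B : Int → List α), S.Pairwise (· > ·) → key x ∈ S →
      (∀ s ∈ S, ∀ y ∈ B s, key y = s) →
      PySem.List.insertBy (fun a b => decide (key b < key a)) x (S.flatMap B)
        = S.flatMap (fun s => if s = key x then B s ++ [x] else B s) := by
  intro S
  induction S with
  | nil => intro B _ hmem _; simp at hmem
  | cons s S ih =>
    intro B hpw hmem hB
    rcases List.pairwise_cons.1 hpw with ⟨hs, hS'⟩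
    simp only [List.flatMap_cons]
    by_cases hsx : s = key x
    · have hskip : ∀ y ∈ B s, (fun a b => decide (key b < key a)) x y = false := by
        intro y hy
        simp [hB s (by simp) y hy, hsx]
      rw [pv_insertBy_append_skip _ x _ _ hskip,
        pv_insertBy_front _ x _ (fun y hy => ?_), if_pos hsx]
      · rw [List.flatMap_congr (l := S) (f := fun s' => if s' = key x then B s' ++ [x] else B s')
            (g := B) (fun s' hs' => if_neg (fun he => absurd (he ▸ hs s' hs') (by simp [hsx])))]
        simp
      · rcases List.mem_flatMap.1 hy with ⟨s', hs', hy'⟩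
        have : key y = s' := hB s' (by simp [hs']) y hy'
        simp [this, hsx ▸ hs s' hs']
    · have hmem' : key x ∈ S := by
        rcases List.mem_cons.1 hmem with h | h
        · exact absurd h.symm hsx
        · exact h
      have hskip : ∀ y ∈ B s, (fun a b => decide (key b < key a)) x y = false := by
        intro y hy
        have hks : key y = s := hB s (by simp) y hy
        have : key x < s := hs _ hmem'
        simp [hks]
        omega
      rw [pv_insertBy_append_skip _ x _ _ hskip,
        ih B hS' hmem' (fun s' hs' y hy => hB s' (by simp [hs']) y hy), if_neg hsx]

-- the stable descending sort is the concatenation of the score buckets,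
-- taken in descending order of the distinct scores
theorem pv_bucket_sorted {α : Type} (key : α → Int) (m : List α) :
    PySem.List.sorted m key true
      = (PySem.List.sorted (PySem.Set.ofList (m.map key)) (fun s => s) true).flatMap
          (fun s => m.filter (fun y => key y == s)) := by
  induction m using List.reverseRecOn with
  | nil => simp [PySem.List.sorted_rev_eq_foldl_insertBy, PySem.Set.ofList_eq_foldl]
  | append_singleton t x ih =>
    have hsortapp : PySem.List.sorted (t ++ [x]) key true
        = PySem.List.insertBy (fun a b => decide (key b < key a)) x
            (PySem.List.sorted t key true) := by
      rw [PySem.List.sorted_rev_eq_foldl_insertBy, List.foldl_append,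
        ← PySem.List.sorted_rev_eq_foldl_insertBy]
      rfl
    have hset : PySem.Set.ofList ((t ++ [x]).map key)
        = PySem.Set.add (PySem.Set.ofList (t.map key)) (key x) := by
      rw [PySem.Set.ofList_eq_foldl, List.map_append, List.foldl_append,
        ← PySem.Set.ofList_eq_foldl]
      rfl
    have hBfresh : ∀ s, (∀ y ∈ t.filter (fun y => key y == s), key y = s) := by
      intro s y hy
      exact beq_iff_eq.1 (List.mem_filter.1 hy).2
    -- the two flatMap body shapes agree pointwise
    have hbody : ∀ S : List Int,
        S.flatMap (fun s => if s = key x then t.filter (fun y => key y == s) ++ [x]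
                            else t.filter (fun y => key y == s))
          = S.flatMap (fun s => (t ++ [x]).filter (fun y => key y == s)) := by
      intro S
      refine List.flatMap_congr (fun s _ => ?_)
      by_cases h : s = key x
      · simp [h, List.filter_append]
      · have : (key x == s) = false := by simp [beq_eq_false_iff_ne]; exact fun he => h he.symm
        simp [h, List.filter_append, this]
    by_cases hmem : key x ∈ t.map key
    · have hSc : PySem.Set.ofList ((t ++ [x]).map key) = PySem.Set.ofList (t.map key) := by
        rw [hset]
        simp [PySem.Set.add, PySem.Set.contains, hmem]
      rw [hsortapp, ih, hSc,
        pv_insertBy_flatMap key x _ _ (pv_sorted_set_pairwise_gt _)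
          (by rw [PySem.List.mem_sorted, PySem.Set.mem_ofList]; exact hmem)
          (fun s _ => hBfresh s),
        hbody]
    · have hxSc : key x ∉ PySem.List.sorted (PySem.Set.ofList (t.map key)) (fun s => s) true := by
        rw [PySem.List.mem_sorted, PySem.Set.mem_ofList]; exact hmem
      have hSc : PySem.List.sorted (PySem.Set.ofList ((t ++ [x]).map key)) (fun s => s) true
          = PySem.List.insertBy (fun a b => decide (b < a)) (key x)
              (PySem.List.sorted (PySem.Set.ofList (t.map key)) (fun s => s) true) := by
        apply PySem.List.sorted_rev_eq_of_perm_of_pairwise_gt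
        · refine ((pv_insertBy_perm _ _ _).trans ?_)
          rw [hset]
          have : PySem.Set.add (PySem.Set.ofList (t.map key)) (key x)
              = PySem.Set.ofList (t.map key) ++ [key x] := by
            simp [PySem.Set.add, PySem.Set.contains, hmem]
          rw [this]
          exact ((PySem.List.sorted_perm _ _ _).cons (key x)).trans
            (List.perm_append_singleton _ _).symm
        · exact pv_insertBy_pairwise_gt _ _ (pv_sorted_set_pairwise_gt _) hxSc
      have hBempty : t.filter (fun y => key y == key x) = [] := by
        rw [List.filter_eq_nil_iff]
        intro y hy hk
        exact hmem (beq_iff_eq.1 hk ▸ List.mem_map_of_mem hy)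
      rw [hsortapp, ih, ← pv_flatMap_insertBy_empty (fun a b => decide (b < a)) (key x) _
          (fun s => t.filter (fun y => key y == s)) hBempty, ← hSc,
        pv_insertBy_flatMap key x _ _ (pv_sorted_set_pairwise_gt _)
          (by rw [PySem.List.mem_sorted, PySem.Set.mem_ofList]; simp)
          (fun s _ => hBfresh s),
        hbody]

theorem pv_main (description : String) (keywords : List (String × Int))
    (hpre : (keywords.map Prod.fst).Nodup) :
    get_compatibility_rating_and_skills description keywords
      = get_compatibility_rating_and_skills_alt description keywords := by
  simp only [get_compatibility_rating_and_skills, get_compatibility_rating_and_skills_alt]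
  set dl := PySem.Str.lower description with hdl
  set c : String → Bool := fun k => PySem.Str.isIn (PySem.Str.lower k) dl with hc
  set m := keywords.filter (fun p => c p.1) with hm
  set kwd : PySem.Dict String Int := PySem.Dict.mk keywords with hkwd
  have hitems : kwd.items = keywords := rfl
  have hkeysn : kwd.keys.Nodup := by rw [hkwd, PySem.Dict.keys_mk]; exact hpre
  have hget : ∀ p ∈ keywords, kwd.getD p.1 0 = p.2 := by
    intro p hp
    exact PySem.Dict.getD_of_mem_items kwd (by rw [hitems]; simpa using hp) hkeysn 0
  set sc := kwd.keys.foldl (fun d k => if c k then d.insert k (kwd.getD k 0) else d)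
      (PySem.Dict.mk []) with hsc
  have hscitems : sc.items = m := by
    rw [hsc, hkwd, PySem.Dict.keys_mk, List.foldl_map,
      pv_build_items c (fun k => kwd.getD k 0) keywords (PySem.Dict.mk [])
        (fun p _ => rfl) hpre]
    simp only [List.nil_append]
    rw [List.map_congr_left (l := keywords.filter (fun p => c p.1)) (g := id)
        (fun p hp => by rw [hget p (List.mem_filter.1 hp).1]; rfl), List.map_id]
  have hmn : (m.map Prod.fst).Nodup :=
    hpre.sublist ((List.filter_sublist).map Prod.fst)
  have hscget : ∀ p ∈ m, sc.getD p.1 0 = p.2 := by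
    intro p hp
    refine PySem.Dict.getD_of_mem_items sc (by rw [hscitems]; simpa using hp) ?_ 0
    rw [PySem.Dict.keys, hscitems]; exact hmn
  have hkeys : sc.keys = m.map Prod.fst := by rw [PySem.Dict.keys, hscitems]
  have hvals : sc.values = m.map Prod.snd := by rw [PySem.Dict.values, hscitems]
  -- B's single fold, turned into its two components over the matched list m
  have hst : keywords.foldl (fun (acc : Int × PySem.Dict Int (List String)) kv =>
        if c kv.1 then (acc.1 + kv.2, acc.2.modify kv.2 [] (fun l => l ++ [kv.1])) else acc)
        (0, PySem.Dict.empty)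
      = ((m.map Prod.snd).sum,
         m.foldl (fun d kv => d.modify kv.2 [] (fun l => l ++ [kv.1])) PySem.Dict.empty) := by
    have h1 : keywords.foldl (fun (acc : Int × PySem.Dict Int (List String)) kv =>
          if c kv.1 then (acc.1 + kv.2, acc.2.modify kv.2 [] (fun l => l ++ [kv.1])) else acc)
          (0, PySem.Dict.empty)
        = m.foldl (fun (acc : Int × PySem.Dict Int (List String)) kv =>
            (acc.1 + kv.2, acc.2.modify kv.2 [] (fun l => l ++ [kv.1]))) (0, PySem.Dict.empty) := by
      rw [hm, List.foldl_filter]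
    have h2 := PySem.List.foldl_prod_mk (fun (a : Int) (kv : String × Int) => a + kv.2)
        (fun (d : PySem.Dict Int (List String)) (kv : String × Int) =>
          d.modify kv.2 [] (fun l => l ++ [kv.1])) m 0 PySem.Dict.empty
    rw [h1, h2, PySem.List.foldl_add m (fun kv => kv.2) 0]
    simp
  rw [hst]
  set bk := m.foldl (fun (d : PySem.Dict Int (List String)) kv =>
      d.modify kv.2 [] (fun l => l ++ [kv.1])) PySem.Dict.empty with hbk
  have hbkeys : bk.keys = PySem.Set.ofList (m.map Prod.snd) := by
    rw [hbk, PySem.Dict.keys_foldl_modify_key m (fun kv => kv.2) []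
        (fun d kv => fun l => l ++ [kv.1]) PySem.Dict.empty, PySem.Dict.keys_empty,
      PySem.Set.ofList_eq_foldl]
    rfl
  have hbget : ∀ s, bk.getD s [] = (m.filter (fun kv => kv.2 == s)).map Prod.fst := by
    intro s
    have hfold : m.foldl (fun (d : PySem.Dict Int (List String)) kv =>
          d.modify kv.2 [] (fun l => l ++ [kv.1])) PySem.Dict.empty
        = (m.map (fun kv => (kv.2, kv.1))).foldl
            (fun (d : PySem.Dict Int (List String)) p =>
              d.modify p.1 [] (fun l => l ++ [p.2])) PySem.Dict.empty := by
      rw [List.foldl_map]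
    rw [hbk, hfold,
      PySem.Dict.getD_foldl_modify_append (m.map (fun kv => (kv.2, kv.1))) PySem.Dict.empty s]
    simp [List.filter_map, Function.comp_def]
  refine Prod.ext ?_ ?_
  · -- the ratings: both are the sum of the matched scores
    rw [hvals]
  · -- the joined skill lists: stable sort of the keys by score = bucket concatenation
    show PySem.Str.join ", " (PySem.List.sorted sc.keys (fun x => sc.getD x 0) true)
        = PySem.Str.join ", " ((PySem.List.sorted bk.keys (fun s => s) true).flatMap
            (fun s => bk.getD s []))
    rw [hkeys, pv_map_sorted_rev m Prod.fst (fun x => sc.getD x 0),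
      pv_sorted_rev_congr m _ (fun p => p.2) hscget,
      pv_bucket_sorted (fun p : String × Int => p.2) m, List.map_flatMap, hbkeys]
    refine congrArg _ (List.flatMap_congr (fun s _ => ?_))
    rw [hbget s]

-- ===== VERDICT (by name: the statement is the Claim_ definition above) =====
theorem get_compatibility_rating_and_skills_spec : Claim_equal_get_compatibility_rating_and_skills := by
  intro description keywords _ hpre
  exact pv_main description keywords hpre
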